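-- pv_equiv track=rewrite | github.com/Fpengz/xFusion-Guardian | src/xfusion/execution/fallback.py | _extract_absolute_paths
-- ===== SOURCE A (Python) =====
-- def _extract_absolute_paths(code: str) -> list[str]:
--     paths: list[str] = []
--     for quote in ("'", '"'):
--         parts = code.split(quote)
--         for index, part in enumerate(parts):
--             if index % 2 == 1 and part.startswith("/"):
--                 paths.append(part)
--     return paths
-- ===== SOURCE B (Python) =====
-- def _extract_absolute_paths(code: str) -> list[str]:
--     # Single-pass quote-tracking scanner per quote char (no split, no index parity).
--     paths: list[str] = []
--     for quote in ("'", '"'):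
--         inside = False
--         buf = ""
--         for ch in code:
--             if ch == quote:
--                 if inside and buf.startswith("/"):
--                     paths.append(buf)
--                 inside = not inside
--                 buf = ""
--             elif inside:
--                 buf += ch
--         if inside and buf.startswith("/"):
--             paths.append(buf)
--     return paths
-- ===== Notes on version B (the rewrite author's own statement) =====
-- stated objective: alternative
-- what changed: Replaced split-on-quote plus odd-index enumeration with a single-pass quote-tracking scanner per quote char that maintains an inside flag and a buffer, so no intermediate parts list or index-parity test exists.
import Mathlib
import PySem

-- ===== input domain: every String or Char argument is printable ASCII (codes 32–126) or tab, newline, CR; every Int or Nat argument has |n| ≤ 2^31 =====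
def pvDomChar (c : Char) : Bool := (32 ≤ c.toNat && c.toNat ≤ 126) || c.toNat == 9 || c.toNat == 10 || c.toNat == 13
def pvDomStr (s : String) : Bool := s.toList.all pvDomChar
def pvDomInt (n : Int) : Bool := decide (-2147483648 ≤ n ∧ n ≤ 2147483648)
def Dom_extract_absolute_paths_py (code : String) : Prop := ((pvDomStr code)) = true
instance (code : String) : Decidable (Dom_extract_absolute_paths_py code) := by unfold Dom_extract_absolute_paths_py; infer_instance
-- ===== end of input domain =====

-- B replaces A's split-then-odd-index decomposition by a single-pass quote-tracking
-- scanner per quote char (simpler state, no intermediate parts list); return values equal.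

-- ===== PORT A =====
-- for quote in ("'", '"'): parts = code.split(quote); for index, part in enumerate(parts): …
def extract_absolute_paths_py (code : String) : List String :=
  ['\'', '"'].foldl
    (fun paths quote =>
      let parts := PySem.Chars.splitOn code.toList [quote]
      (PySem.List.enumerate parts 0).foldl
        (fun paths ip =>
          if (PySem.Int.mod ip.1 2 == 1) && PySem.Chars.startswith ip.2 ['/'] then
            paths ++ [String.ofList ip.2]
          else paths)
        paths)
    []

-- ===== PORT B =====
-- one step of B's inner character loop: state = (paths, inside, buf)
def pvScanStep (quote : Char) (s : List String × Bool × List Char) (ch : Char) :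
    List String × Bool × List Char :=
  let (paths, inside, buf) := s
  if ch == quote then
    (if inside && PySem.Chars.startswith buf ['/'] then paths ++ [String.ofList buf] else paths,
     !inside, [])
  else if inside then (paths, inside, buf ++ [ch])
  else (paths, inside, buf)

def extract_absolute_paths_py_alt (code : String) : List String :=
  ['\'', '"'].foldl
    (fun paths quote =>
      let st := code.toList.foldl (pvScanStep quote) (paths, false, [])
      if st.2.1 && PySem.Chars.startswith st.2.2 ['/'] then st.1 ++ [String.ofList st.2.2]
      else st.1)
    []

-- ===== PRECONDITION & SPEC =====
def Spec_extract_absolute_paths_py (code : String) (out : List String) : Prop := out = extract_absolute_paths_py_alt code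
instance (code : String) (out : List String) : Decidable (Spec_extract_absolute_paths_py code out) := by unfold Spec_extract_absolute_paths_py; infer_instance

-- ===== CLAIM (what is proved, stated in full; the proofs are below) =====
def Claim_equal_extract_absolute_paths_py : Prop := ∀ (code : String), Dom_extract_absolute_paths_py code → Spec_extract_absolute_paths_py code (extract_absolute_paths_py code)

-- ===== LEMMAS AND PROOFS =====

-- reference decomposition: the pieces of cs between occurrences of q (always nonempty)
def pvParts (q : Char) : List Char → List (List Char)
  | [] => [[]]
  | c :: rest =>
    if c = q then [] :: pvParts q rest
    else
      match pvParts q rest with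
      | [] => [[c]]
      | p :: ps => (c :: p) :: ps

lemma pvParts_ne_nil (q : Char) (cs : List Char) : pvParts q cs ≠ [] := by
  cases cs with
  | nil => simp [pvParts]
  | cons c rest =>
    simp only [pvParts]
    split_ifs
    · simp
    · rcases h : pvParts q rest with _ | ⟨p, ps⟩ <;> simp

def pvPrep (cur : List Char) : List (List Char) → List (List Char)
  | [] => [cur]
  | p :: ps => (cur ++ p) :: ps

lemma pvSplitOn_go_eq (q : Char) :
    ∀ (l : List Char) (fuel : Nat), l.length ≤ fuel → ∀ (cur : List Char) (acc : List (List Char)),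
      PySem.Chars.splitOn.go [q] fuel l cur acc = acc.reverse ++ pvPrep cur.reverse (pvParts q l) := by
  intro l
  induction l with
  | nil =>
    intro fuel _ cur acc
    cases fuel <;> simp [PySem.Chars.splitOn.go, pvParts, pvPrep]
  | cons c rest ih =>
    intro fuel hf cur acc
    cases fuel with
    | zero => simp at hf
    | succ n =>
      have hn : rest.length ≤ n := by simpa using hf
      by_cases hc : c = q
      · subst hc
        have hpre : List.isPrefixOf [c] (c :: rest) = true := by
          simp [List.isPrefixOf]
        simp only [PySem.Chars.splitOn.go, hpre, if_pos, List.length_cons, List.length_nil,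
          List.drop_succ_cons, List.drop_zero]
        rw [ih n hn [] (cur.reverse :: acc)]
        rcases h : pvParts c rest with _ | ⟨p, ps⟩
        · exact absurd h (pvParts_ne_nil c rest)
        · simp [pvParts, h, pvPrep]
      · have hpre : List.isPrefixOf [q] (c :: rest) = false := by
          simp [List.isPrefixOf]
          exact fun h => absurd h.symm hc
        simp only [PySem.Chars.splitOn.go, hpre, Bool.false_eq_true, if_false]
        rw [ih n hn (c :: cur) acc]
        rcases h : pvParts q rest with _ | ⟨p, ps⟩
        · exact absurd h (pvParts_ne_nil q rest)
        · simp [pvParts, hc, h, pvPrep]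

lemma pvSplitOn_eq_parts (q : Char) (cs : List Char) :
    PySem.Chars.splitOn cs [q] = pvParts q cs := by
  have := pvSplitOn_go_eq q cs (cs.length + 1) (by omega) [] []
  rcases h : pvParts q cs with _ | ⟨p, ps⟩
  · exact absurd h (pvParts_ne_nil q cs)
  · simpa [PySem.Chars.splitOn, h, pvPrep] using this

-- what both loops select: the parts at alternating flags, head part prefixed by buf
def pvSel (inside : Bool) (buf : List Char) : List (List Char) → List String
  | [] => []
  | p :: ps =>
    (if inside && PySem.Chars.startswith (buf ++ p) ['/'] then [String.ofList (buf ++ p)] else [])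
      ++ pvSel (!inside) [] ps

lemma pvSel_false_buf (buf buf' : List Char) (ps : List (List Char)) :
    pvSel false buf ps = pvSel false buf' ps := by
  cases ps <;> simp [pvSel]

-- A's inner enumerate-fold computes pvSel (parity of the start index) [] parts
lemma pvFoldA (parts : List (List Char)) :
    ∀ (s : Int), 0 ≤ s → ∀ (paths : List String),
      (PySem.List.enumerate parts s).foldl
        (fun paths ip =>
          if (PySem.Int.mod ip.1 2 == 1) && PySem.Chars.startswith ip.2 ['/'] then
            paths ++ [String.ofList ip.2]
          else paths)
        paths
      = paths ++ pvSel (PySem.Int.mod s 2 == 1) [] parts := by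
  induction parts with
  | nil => intro s _ paths; simp [PySem.List.enumerate, pvSel]
  | cons p ps ih =>
    intro s hs paths
    have hfm : ∀ t : Int, t.fmod 2 = t % 2 := fun t => by rw [Int.fmod_eq_emod]; simp
    have hpar : (PySem.Int.mod (s + 1) 2 == 1) = !(PySem.Int.mod s 2 == 1) := by
      simp only [PySem.Int.mod, hfm]
      rcases Int.emod_two_eq_zero_or_one s with h | h
      · have h1 : (s + 1) % 2 = 1 := by omega
        simp [h, h1]
      · have h1 : (s + 1) % 2 = 0 := by omega
        simp [h, h1]
    rw [PySem.List.enumerate_cons, List.foldl_cons, ih (s + 1) (by omega)]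
    simp only [pvSel, hpar, List.nil_append]
    split_ifs with h <;> simp [h]

-- B's scanner (plus its post-loop flush) computes pvSel inside buf (pvParts q cs)
lemma pvFoldB (q : Char) (cs : List Char) :
    ∀ (inside : Bool) (buf : List Char) (paths : List String),
      (let st := cs.foldl (pvScanStep q) (paths, inside, buf)
       if st.2.1 && PySem.Chars.startswith st.2.2 ['/'] then st.1 ++ [String.ofList st.2.2]
       else st.1)
      = paths ++ pvSel inside buf (pvParts q cs) := by
  induction cs with
  | nil =>
    intro inside buf paths
    cases hc : inside && PySem.Chars.startswith buf ['/'] <;>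
      simp [pvParts, pvSel, hc]
  | cons c rest ih =>
    intro inside buf paths
    by_cases hc : c = q
    · subst hc
      simp only [List.foldl_cons, pvScanStep, beq_self_eq_true, if_pos]
      rw [ih (!inside) []]
      cases he : inside && PySem.Chars.startswith buf ['/'] <;>
        simp [pvParts, pvSel, he]
    · have hb : (c == q) = false := by simp [hc]
      rcases h : pvParts q rest with _ | ⟨p, ps⟩
      · exact absurd h (pvParts_ne_nil q rest)
      · cases inside with
        | true =>
          simp only [List.foldl_cons, pvScanStep, hb, Bool.false_eq_true, if_false, if_pos]
          rw [ih true (buf ++ [c])]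
          simp [pvParts, hc, h, pvSel]
        | false =>
          simp only [List.foldl_cons, pvScanStep, hb, Bool.false_eq_true, if_false]
          rw [ih false buf]
          rw [pvSel_false_buf buf buf]
          simp only [pvParts, hc, if_neg, h]
          simp [pvSel, pvSel_false_buf buf []]

-- per-quote agreement
lemma pvQuote (q : Char) (code : String) (paths : List String) :
    (let parts := PySem.Chars.splitOn code.toList [q]
     (PySem.List.enumerate parts 0).foldl
       (fun paths ip =>
         if (PySem.Int.mod ip.1 2 == 1) && PySem.Chars.startswith ip.2 ['/'] then
           paths ++ [String.ofList ip.2]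
         else paths)
       paths)
    = (let st := code.toList.foldl (pvScanStep q) (paths, false, [])
       if st.2.1 && PySem.Chars.startswith st.2.2 ['/'] then st.1 ++ [String.ofList st.2.2]
       else st.1) := by
  rw [pvFoldB q code.toList false [] paths, pvSplitOn_eq_parts,
      pvFoldA (pvParts q code.toList) 0 (by norm_num) paths,
      show (PySem.Int.mod 0 2 == 1) = false from by decide]

-- ===== VERDICT (by name: the statement is the Claim_ definition above) =====
theorem extract_absolute_paths_py_spec : Claim_equal_extract_absolute_paths_py := by
  intro code _
  unfold Spec_extract_absolute_paths_py extract_absolute_paths_py extract_absolute_paths_py_alt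
  simp only [List.foldl_cons, List.foldl_nil]
  rw [pvQuote '\'' code [], pvQuote '"' code]
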